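-- pv_equiv track=rewrite | github.com/hyunjiLee123/AlgorithmStudy | 프로그래머스/unrated/181932. 코드 처리하기/코드 처리하기.py | solution
-- ===== SOURCE A (Python) =====
-- def solution(code):
--     answer = ''
--     mode = 0
--     for i in range(0, len(code)):
--         if code[i] == '1':
--             if mode == 0:
--                 mode = 1
--                 continue
--             else:
--                 mode = 0
--                 continue
--         if mode == 1:
--             if i % 2 != 0:
--                 answer += code[i]
--             else:
--                 continue
--         if mode == 0:
--             if i % 2 == 0:
--                 answer += code[i]
--             else:
--                 continue
--     if len(answer) == 0:
--         answer = "EMPTY"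
--     return answer
-- ===== SOURCE B (Python) =====
-- def solution(code):
--     # prefix table: ones_before[i] = number of '1' chars in code[:i]
--     ones_before = []
--     ones = 0
--     for c in code:
--         ones_before.append(ones)
--         if c == '1':
--             ones += 1
--     res = ''.join(c for i, c in enumerate(code)
--                   if c != '1' and ones_before[i] % 2 == i % 2)
--     return res if res else "EMPTY"
-- ===== Notes on version B (the rewrite author's own statement) =====
-- stated objective: alternative
-- what changed: Replaces A's stateful toggle loop (a mode flag mutated while appending) with a precomputed prefix table counting toggle characters before each index plus a single filtering comprehension that keeps non-toggle characters whose prefix-count parity equals their index parity.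
import Mathlib
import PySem

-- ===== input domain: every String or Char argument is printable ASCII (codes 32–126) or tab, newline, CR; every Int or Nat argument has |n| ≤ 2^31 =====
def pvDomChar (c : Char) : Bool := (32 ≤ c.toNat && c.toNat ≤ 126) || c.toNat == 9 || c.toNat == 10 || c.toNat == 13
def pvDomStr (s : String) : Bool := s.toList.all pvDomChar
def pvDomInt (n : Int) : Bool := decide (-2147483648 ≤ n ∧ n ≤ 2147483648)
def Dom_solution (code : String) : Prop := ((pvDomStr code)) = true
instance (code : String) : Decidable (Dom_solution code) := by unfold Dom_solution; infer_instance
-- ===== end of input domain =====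

-- B replaces A's stateful toggle loop by a precomputed prefix table counting toggle characters
-- before each index, plus a single filtering pass on prefix-count parity vs index parity.


-- ===== PORT A =====
-- A's for-loop over indices with the toggling `mode` and the growing `answer`,
-- as a structural recursion building the kept characters front to back.
def solutionLoopA : List Char → Nat → Int → List Char
  | [], _, _ => []
  | c :: rest, i, mode =>
    if c = '1' then
      if mode = 0 then solutionLoopA rest (i + 1) 1
      else solutionLoopA rest (i + 1) 0
    else if mode = 1 then
      if i % 2 ≠ 0 then c :: solutionLoopA rest (i + 1) mode
      else solutionLoopA rest (i + 1) mode
    else if mode = 0 then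
      if i % 2 = 0 then c :: solutionLoopA rest (i + 1) mode
      else solutionLoopA rest (i + 1) mode
    else solutionLoopA rest (i + 1) mode

def solution (code : String) : String :=
  let answer := solutionLoopA code.toList 0 0
  if answer.length = 0 then "EMPTY" else String.ofList answer

-- ===== PORT B =====
-- B's prefix table: onesBefore cs ones = [count of '1' strictly before each position], seeded with ones.
def onesBefore : List Char → Nat → List Nat
  | [], _ => []
  | c :: rest, ones => ones :: onesBefore rest (if c = '1' then ones + 1 else ones)

def solution_alt (code : String) : String :=
  let cs := code.toList
  let res := (List.zip cs.zipIdx (onesBefore cs 0)).filterMap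
    (fun p => if p.1.1 ≠ '1' ∧ p.2 % 2 = p.1.2 % 2 then some p.1.1 else none)
  if res = [] then "EMPTY" else String.ofList res

-- ===== PRECONDITION & SPEC =====
def Spec_solution (code : String) (out : String) : Prop := out = solution_alt code
instance (code : String) (out : String) : Decidable (Spec_solution code out) := by unfold Spec_solution; infer_instance

-- ===== CLAIM (what is proved, stated in full; the proofs are below) =====
def Claim_equal_solution : Prop := ∀ (code : String), Dom_solution code → Spec_solution code (solution code)

-- ===== LEMMAS AND PROOFS =====
-- Invariant: A's mode is the parity of the number of '1's seen so far, B's seed `ones`.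
theorem loop_eq (cs : List Char) : ∀ (i ones : Nat),
    solutionLoopA cs i (if ones % 2 = 0 then 0 else 1)
      = (List.zip (cs.zipIdx i) (onesBefore cs ones)).filterMap
          (fun p => if p.1.1 ≠ '1' ∧ p.2 % 2 = p.1.2 % 2 then some p.1.1 else none) := by
  induction cs with
  | nil => intro i ones; simp [solutionLoopA, onesBefore]
  | cons c rest ih =>
    intro i ones
    by_cases hc : c = '1'
    · have IH := ih (i + 1) (ones + 1)
      by_cases hm : ones % 2 = 0
      · rw [if_neg (by omega)] at IH
        simp [solutionLoopA, onesBefore, List.zipIdx_cons, hc, hm, IH]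
      · rw [if_pos (by omega)] at IH
        simp [solutionLoopA, onesBefore, List.zipIdx_cons, hc, hm, IH]
    · have IH := ih (i + 1) ones
      by_cases hm : ones % 2 = 0
      · rw [if_pos hm] at IH
        by_cases hi : i % 2 = 0
        · simp [solutionLoopA, onesBefore, List.zipIdx_cons, hc, hm, hi, IH]
        · have hi1 : i % 2 = 1 := by omega
          simp [solutionLoopA, onesBefore, List.zipIdx_cons, hc, hm, hi1, IH]
      · have hm1 : ones % 2 = 1 := by omega
        rw [if_neg hm] at IH
        by_cases hi : i % 2 = 0
        · simp [solutionLoopA, onesBefore, List.zipIdx_cons, hc, hm1, hi, IH]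
        · have hi1 : i % 2 = 1 := by omega
          simp [solutionLoopA, onesBefore, List.zipIdx_cons, hc, hm1, hi1, IH]

-- ===== VERDICT (by name: the statement is the Claim_ definition above) =====
theorem solution_spec : Claim_equal_solution := by
  intro code _
  unfold Spec_solution
  have h := loop_eq code.toList 0 0
  norm_num at h
  simp only [solution, solution_alt]
  rw [h]
  generalize List.filterMap _ _ = L
  rcases L with _ | ⟨x, L⟩ <;> simp
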